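-- pv_equiv track=rewrite | github.com/Noice1909/Neo4j-Agent | src/graph/topology.py | _build_label_aliases
-- ===== SOURCE A (Python) =====
-- def _build_label_aliases(
--     multi_label_rows: list[dict],
--     known_labels: set[str],
-- ) -> dict[str, list[str]]:
--     """
--     Build a primary_label → [alias_labels] map from multi-label node groups.
--
--     The "primary" label is whichever member of the group already appears as a
--     source or target in the triples query (i.e. is in *known_labels*), chosen
--     alphabetically.  Unknown co-labels are listed as aliases.
--     """
--     aliases: dict[str, list[str]] = {}
--     for row in multi_label_rows:
--         _merge_group(row.get("label_group") or [], known_labels, aliases)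
--     return aliases
--
-- def _merge_group(
--     group: list[str],
--     known_labels: set[str],
--     aliases: dict[str, list[str]],
-- ) -> None:
--     """Merge one label group into the alias map (mutates *aliases*)."""
--     if len(group) < 2:
--         return
--     known_in_group = sorted(lbl for lbl in group if lbl in known_labels)
--     if not known_in_group:
--         return
--     primary = known_in_group[0]
--     others = known_in_group[1:] + [lbl for lbl in group if lbl not in known_labels]
--     current = aliases.setdefault(primary, [])
--     current.extend(alias for alias in others if alias not in current)
-- ===== SOURCE B (Python) =====
-- def _build_label_aliases(multi_label_rows, known_labels):
--     # Flatten: one (primary, candidate-aliases) pair per qualifying group.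
--     pairs = []
--     for row in multi_label_rows:
--         group = row.get("label_group") or []
--         if len(group) < 2:
--             continue
--         known_in_group = sorted(l for l in group if l in known_labels)
--         if not known_in_group:
--             continue
--         pairs.append((known_in_group[0],
--                       known_in_group[1:] + [l for l in group if l not in known_labels]))
--     # Group by primary: for each distinct primary (first-occurrence order),
--     # gather every candidate across all its pairs and dedupe once.
--     result = {}
--     for primary, _ in pairs:
--         if primary not in result:
--             result[primary] = list(dict.fromkeys(
--                 c for p, cands in pairs if p == primary for c in cands))
--     return result
-- ===== Notes on version B (the rewrite author's own statement) =====
-- stated objective: alternative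
-- what changed: B first flattens the rows into a list of (primary, candidate-aliases) pairs, then builds the result by grouping: for each distinct primary in first-occurrence order it scans the whole pair list, concatenates all its candidates and deduplicates once with dict.fromkeys, instead of A's single pass that incrementally extends the result dict with an inline membership check per alias.
import Mathlib
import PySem

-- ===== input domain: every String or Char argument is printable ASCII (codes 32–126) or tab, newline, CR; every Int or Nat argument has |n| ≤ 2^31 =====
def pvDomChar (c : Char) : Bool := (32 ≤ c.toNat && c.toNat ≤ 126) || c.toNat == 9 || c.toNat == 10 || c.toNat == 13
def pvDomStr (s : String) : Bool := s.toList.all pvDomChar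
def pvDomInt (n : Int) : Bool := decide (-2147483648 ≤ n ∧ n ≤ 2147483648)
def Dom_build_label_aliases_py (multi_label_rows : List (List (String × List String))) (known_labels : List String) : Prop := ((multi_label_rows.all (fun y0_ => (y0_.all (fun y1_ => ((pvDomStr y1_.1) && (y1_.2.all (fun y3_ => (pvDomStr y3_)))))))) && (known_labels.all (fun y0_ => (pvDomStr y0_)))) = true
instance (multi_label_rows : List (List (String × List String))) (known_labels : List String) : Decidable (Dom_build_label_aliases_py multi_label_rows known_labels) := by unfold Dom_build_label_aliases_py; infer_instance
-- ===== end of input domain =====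

-- B flattens the rows to one (primary, candidates) pair per qualifying group, then groups by
-- distinct primary with one nested scan + dedup per primary, instead of A's single pass that
-- mutates the result dict incrementally; objective: alternative (different decomposition).


-- ===== PORT A =====
-- row.get("label_group") or []  (first-match lookup on the association list; missing → [])
def pvRowGroup (row : List (String × List String)) : List String :=
  match row.lookup "label_group" with
  | some g => g
  | none => []

-- current.extend(alias for alias in others if alias not in current): the generator sees
-- the list as it grows, so duplicates inside `others` are filtered too.
def pvExtendA (cur : List String) (others : List String) : List String :=
  others.foldl (fun c a => if a ∈ c then c else c ++ [a]) cur

-- _merge_group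
def pvMergeGroup (group : List String) (known : List String)
    (aliases : PySem.Dict String (List String)) : PySem.Dict String (List String) :=
  if group.length < 2 then aliases
  else
    match PySem.List.sorted (group.filter (fun l => decide (l ∈ known))) (fun x => x) false with
    | [] => aliases
    | primary :: rest =>
      let others := rest ++ group.filter (fun l => decide (l ∉ known))
      let d := aliases.setdefault primary []
      d.insert primary (pvExtendA (d.getD primary []) others)

def build_label_aliases_py (multi_label_rows : List (List (String × List String))) (known_labels : List String) : List (String × List String) :=
  (multi_label_rows.foldl
    (fun aliases row => pvMergeGroup (pvRowGroup row) known_labels aliases)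
    PySem.Dict.empty).items

-- ===== PORT B =====
-- one (primary, candidate aliases) pair per qualifying group; None for skipped rows
def pvPairOfRow (known : List String) (row : List (String × List String)) :
    Option (String × List String) :=
  let group := pvRowGroup row
  if group.length < 2 then none
  else
    match PySem.List.sorted (group.filter (fun l => decide (l ∈ known))) (fun x => x) false with
    | [] => none
    | primary :: rest =>
      some (primary, rest ++ group.filter (fun l => decide (l ∉ known)))

def build_label_aliases_py_alt (multi_label_rows : List (List (String × List String))) (known_labels : List String) : List (String × List String) :=
  let pairs := multi_label_rows.filterMap (pvPairOfRow known_labels)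
  (pairs.foldl
    (fun res p =>
      if res.contains p.1 then res
      else res.insert p.1
        (PySem.List.dedup ((pairs.filter (fun q => q.1 == p.1)).flatMap (fun q => q.2))))
    PySem.Dict.empty).items

-- ===== PRECONDITION & SPEC =====
def Spec_build_label_aliases_py (multi_label_rows : List (List (String × List String))) (known_labels : List String) (out : List (String × List String)) : Prop := out = build_label_aliases_py_alt multi_label_rows known_labels
instance (multi_label_rows : List (List (String × List String))) (known_labels : List String) (out : List (String × List String)) : Decidable (Spec_build_label_aliases_py multi_label_rows known_labels out) := by unfold Spec_build_label_aliases_py; infer_instance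

-- ===== CLAIM (what is proved, stated in full; the proofs are below) =====
def Claim_equal_build_label_aliases_py : Prop := ∀ (multi_label_rows : List (List (String × List String))) (known_labels : List String), Dom_build_label_aliases_py multi_label_rows known_labels → Spec_build_label_aliases_py multi_label_rows known_labels (build_label_aliases_py multi_label_rows known_labels)

-- ===== LEMMAS AND PROOFS =====

-- A's per-pair step (setdefault + membership-checked extend)
def pvStepA (d : PySem.Dict String (List String)) (pr : String × List String) :
    PySem.Dict String (List String) :=
  let d' := d.setdefault pr.1 []
  d'.insert pr.1 (pvExtendA (d'.getD pr.1 []) pr.2)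

-- the raw (un-deduplicated) accumulation step
def pvStepRaw (d : PySem.Dict String (List String)) (pr : String × List String) :
    PySem.Dict String (List String) :=
  d.insert pr.1 (d.getD pr.1 [] ++ pr.2)

-- the value B computes for primary k, over the full pair list
def pvV (pairs : List (String × List String)) (k : String) : List String :=
  PySem.List.dedup ((pairs.filter (fun q => q.1 == k)).flatMap (fun q => q.2))

-- map dedup over the values of a dict, on the items level
def pvMapDedup (d : PySem.Dict String (List String)) : PySem.Dict String (List String) :=
  PySem.Dict.mk (d.items.map (fun p => (p.1, PySem.List.dedup p.2)))

theorem pvMergeGroup_eq_match (row : List (String × List String)) (known : List String)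
    (d : PySem.Dict String (List String)) :
    pvMergeGroup (pvRowGroup row) known d =
      match pvPairOfRow known row with
      | none => d
      | some pr => pvStepA d pr := by
  unfold pvMergeGroup pvPairOfRow
  by_cases h : (pvRowGroup row).length < 2
  · simp only [h, if_true]
  · simp only [h, if_false]
    cases PySem.List.sorted ((pvRowGroup row).filter (fun l => decide (l ∈ known))) (fun x => x) false with
    | nil => rfl
    | cons primary rest => rfl

theorem pvExtendA_eq_update (others cur : List String) :
    pvExtendA cur others = PySem.Set.update cur others := by
  induction others generalizing cur with
  | nil => rfl
  | cons a t ih =>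
    simp only [pvExtendA, List.foldl_cons] at *
    rw [PySem.Set.update_cons, ← ih, PySem.Set.add_eq_ite]

theorem pvExtendA_dedup (v others : List String) :
    pvExtendA (PySem.List.dedup v) others = PySem.List.dedup (v ++ others) := by
  simp only [PySem.List.dedup_eq_ofList, pvExtendA_eq_update, PySem.Set.ofList_append]

theorem pv_get?_mapDedup (d : PySem.Dict String (List String)) (k : String) :
    (pvMapDedup d).get? k = (d.get? k).map PySem.List.dedup := by
  obtain ⟨items⟩ := d
  induction items with
  | nil => rfl
  | cons p t ih =>
    obtain ⟨k1, v1⟩ := p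
    simp only [pvMapDedup, List.map_cons, PySem.Dict.get?_mk_cons] at *
    by_cases hp : (k1 == k) = true
    · simp only [hp, if_true, Option.map_some]
    · simp only [hp, if_false, Bool.false_eq_true, ih]

theorem pv_getD_mapDedup (d : PySem.Dict String (List String)) (k : String) :
    (pvMapDedup d).getD k [] = PySem.List.dedup (d.getD k []) := by
  rw [PySem.Dict.getD_eq_get?_getD, PySem.Dict.getD_eq_get?_getD, pv_get?_mapDedup]
  cases d.get? k <;> rfl

theorem pv_contains_mapDedup (d : PySem.Dict String (List String)) (k : String) :
    (pvMapDedup d).contains k = d.contains k := by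
  rw [PySem.Dict.contains_eq_isSome_get?, PySem.Dict.contains_eq_isSome_get?, pv_get?_mapDedup]
  cases d.get? k <;> rfl

theorem pv_keys_mapDedup (d : PySem.Dict String (List String)) :
    (pvMapDedup d).keys = d.keys := by
  simp only [pvMapDedup, PySem.Dict.keys, List.map_map]
  rfl

theorem pv_insert_mapDedup (d : PySem.Dict String (List String)) (k : String) (v : List String) :
    (pvMapDedup d).insert k (PySem.List.dedup v) = pvMapDedup (d.insert k v) := by
  apply PySem.Dict.ext
  rw [PySem.Dict.items_insert, pv_contains_mapDedup]
  simp only [pvMapDedup, PySem.Dict.items_insert]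
  by_cases h : d.contains k = true
  · simp only [h, if_true, List.map_map]
    apply List.map_congr_left
    intro p _
    by_cases hp : p.1 = k
    · simp [hp]
    · simp [hp]
  · simp only [h, if_false, Bool.false_eq_true, List.map_append, List.map_cons, List.map_nil]

theorem pv_setdefault_insert (d : PySem.Dict String (List String)) (k : String)
    (v w : List String) : (d.setdefault k v).insert k w = d.insert k w := by
  by_cases h : d.contains k = true
  · rw [PySem.Dict.setdefault_of_contains d v h]
  · rw [PySem.Dict.setdefault_of_not_contains d v (by simpa using h),
      PySem.Dict.insert_insert_self]

theorem pv_getD_setdefault (d : PySem.Dict String (List String)) (k : String) :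
    (d.setdefault k []).getD k [] = d.getD k [] := by
  rw [PySem.Dict.getD_eq_get?_getD, PySem.Dict.get?_setdefault_self,
    PySem.Dict.getD_eq_get?_getD]
  cases d.get? k <;> rfl

-- one A-step on a deduped dict is one raw step followed by dedup
theorem pv_stepA_mapDedup (raw : PySem.Dict String (List String)) (pr : String × List String) :
    pvStepA (pvMapDedup raw) pr = pvMapDedup (pvStepRaw raw pr) := by
  unfold pvStepA pvStepRaw
  rw [pv_setdefault_insert, pv_getD_setdefault, pv_getD_mapDedup, pvExtendA_dedup,
    pv_insert_mapDedup]

theorem pv_foldA_mapDedup (l : List (String × List String))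
    (raw : PySem.Dict String (List String)) :
    l.foldl pvStepA (pvMapDedup raw) = pvMapDedup (l.foldl pvStepRaw raw) := by
  induction l generalizing raw with
  | nil => rfl
  | cons p t ih => simp only [List.foldl_cons, pv_stepA_mapDedup, ih]

-- A's fold over rows is the pvStepA fold over the flattened pair list
theorem pv_foldA_rows (rows : List (List (String × List String))) (known : List String)
    (d : PySem.Dict String (List String)) :
    rows.foldl (fun aliases row => pvMergeGroup (pvRowGroup row) known aliases) d
      = (rows.filterMap (pvPairOfRow known)).foldl pvStepA d := by
  induction rows generalizing d with
  | nil => rfl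
  | cons r t ih =>
    simp only [List.foldl_cons, List.filterMap_cons]
    rw [pvMergeGroup_eq_match]
    cases pvPairOfRow known r with
    | none => exact ih d
    | some pr => simp only [List.foldl_cons]; exact ih _

-- value accumulated by the raw fold at key k
theorem pv_getD_foldRaw (l : List (String × List String))
    (raw : PySem.Dict String (List String)) (k : String) :
    (l.foldl pvStepRaw raw).getD k []
      = raw.getD k [] ++ (l.filter (fun q => q.1 == k)).flatMap (fun q => q.2) := by
  induction l generalizing raw with
  | nil => simp
  | cons p t ih =>
    simp only [List.foldl_cons, ih, List.filter_cons, pvStepRaw, PySem.Dict.getD_insert]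
    by_cases h : p.1 = k
    · subst h
      simp [List.append_assoc]
    · have hb : (p.1 == k) = false := by simpa using h
      have hk : ¬ k = p.1 := fun e => h e.symm
      simp [hb, hk]

theorem pv_keys_foldRaw (l : List (String × List String))
    (raw : PySem.Dict String (List String)) :
    (l.foldl pvStepRaw raw).keys = PySem.Set.update raw.keys (l.map (fun q => q.1)) := by
  exact PySem.Dict.keys_foldl_insert_key l (fun q => q.1)
    (fun d q => d.getD q.1 [] ++ q.2) raw

theorem pv_nodup_keys_foldRaw (l : List (String × List String)) :
    (l.foldl pvStepRaw PySem.Dict.empty).keys.Nodup := by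
  exact PySem.Dict.nodup_keys_foldl_insert_key l (fun q => q.1)
    (fun d q => d.getD q.1 [] ++ q.2) PySem.Dict.empty PySem.Dict.nodup_keys_empty

-- B's fold: lookup characterisation (V computed over the fixed full pair list)
theorem pv_get?_foldB (pairs l : List (String × List String))
    (res : PySem.Dict String (List String)) (k : String) :
    (l.foldl (fun res p => if res.contains p.1 then res
        else res.insert p.1 (pvV pairs p.1)) res).get? k
      = match res.get? k with
        | some v => some v
        | none => if k ∈ l.map (fun q => q.1) then some (pvV pairs k) else none := by
  induction l generalizing res with
  | nil => cases hg : res.get? k <;> simp [hg]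
  | cons p t ih =>
    simp only [List.foldl_cons, List.map_cons, List.mem_cons]
    by_cases hc : res.contains p.1 = true
    · rw [if_pos hc, ih]
      cases hg : res.get? k with
      | some v => rfl
      | none =>
        have hk : ¬ k = p.1 := by
          intro he
          rw [PySem.Dict.contains_eq_isSome_get?] at hc
          rw [he] at hg; rw [hg] at hc; simp at hc
        simp only [hk, false_or]
    · rw [if_neg hc, ih, PySem.Dict.get?_insert]
      by_cases hk : k = p.1
      · subst hk
        have hg : res.get? p.1 = none := by
          rw [PySem.Dict.contains_eq_isSome_get?] at hc
          cases hg : res.get? p.1 with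
          | none => rfl
          | some v => rw [hg] at hc; simp at hc
        simp [hg]
      · rw [if_neg hk]
        cases res.get? k with
        | some v => rfl
        | none => simp only [hk, false_or]

theorem pv_keys_foldB (pairs l : List (String × List String))
    (res : PySem.Dict String (List String)) :
    (l.foldl (fun res p => if res.contains p.1 then res
        else res.insert p.1 (pvV pairs p.1)) res).keys
      = PySem.Set.update res.keys (l.map (fun q => q.1)) := by
  induction l generalizing res with
  | nil => rfl
  | cons p t ih =>
    simp only [List.foldl_cons, List.map_cons]
    rw [PySem.Set.update_cons]
    by_cases hc : res.contains p.1 = true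
    · have hmem : p.1 ∈ res.keys := (PySem.Dict.contains_iff_mem_keys res p.1).mp hc
      simp only [hc, if_true, ih]
      congr 1
      simp [hmem]
    · have hmem : p.1 ∉ res.keys := fun h =>
        hc ((PySem.Dict.contains_iff_mem_keys res p.1).mpr h)
      simp only [hc, Bool.false_eq_true, if_false, ih]
      congr 1
      rw [PySem.Dict.keys_insert_of_not_contains _ _ (by simpa using hc)]
      simp [hmem]

theorem pv_nodup_keys_foldB (pairs l : List (String × List String)) :
    ((l.foldl (fun res p => if res.contains p.1 then res
        else res.insert p.1 (pvV pairs p.1)) PySem.Dict.empty)).keys.Nodup := by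
  rw [pv_keys_foldB]
  have : (PySem.Dict.empty : PySem.Dict String (List String)).keys = ([] : PySem.Set String) := rfl
  rw [this]
  exact PySem.Set.nodup_update _ _ (List.nodup_nil)

-- the central equality: A's per-pair fold and B's group-by fold have the same items
theorem pv_main (pairs : List (String × List String)) :
    (pairs.foldl pvStepA PySem.Dict.empty).items
      = (pairs.foldl (fun res p => if res.contains p.1 then res
          else res.insert p.1 (pvV pairs p.1)) PySem.Dict.empty).items := by
  have hA : pairs.foldl pvStepA PySem.Dict.empty
      = pvMapDedup (pairs.foldl pvStepRaw PySem.Dict.empty) := by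
    rw [← pv_foldA_mapDedup]; rfl
  rw [hA]
  have hkA : (pvMapDedup (pairs.foldl pvStepRaw PySem.Dict.empty)).keys
      = PySem.Set.update [] (pairs.map (fun q => q.1)) := by
    rw [pv_keys_mapDedup, pv_keys_foldRaw]; rfl
  have hndA : (pvMapDedup (pairs.foldl pvStepRaw PySem.Dict.empty)).keys.Nodup := by
    rw [pv_keys_mapDedup]; exact pv_nodup_keys_foldRaw pairs
  have hkB : ((pairs.foldl (fun res p => if res.contains p.1 then res
        else res.insert p.1 (pvV pairs p.1)) PySem.Dict.empty)).keys
      = PySem.Set.update [] (pairs.map (fun q => q.1)) := by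
    rw [pv_keys_foldB]; rfl
  have hndB := pv_nodup_keys_foldB pairs pairs
  rw [PySem.Dict.items_eq_map_keys _ hndA ([] : List String),
    PySem.Dict.items_eq_map_keys _ hndB ([] : List String), hkA, hkB]
  apply List.map_congr_left
  intro k hk
  have hkmem : k ∈ pairs.map (fun q => q.1) := by
    have he : PySem.Set.update ([] : PySem.Set String) (pairs.map (fun q => q.1))
        = PySem.Set.ofList (pairs.map (fun q => q.1)) := rfl
    rw [he] at hk
    exact (PySem.Set.mem_ofList _ _).mp hk
  congr 1
  rw [pv_getD_mapDedup, pv_getD_foldRaw]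
  conv_rhs => rw [PySem.Dict.getD_eq_get?_getD, pv_get?_foldB]
  simp only [PySem.Dict.get?_empty, PySem.Dict.getD_empty, hkmem, if_true]
  rfl

-- ===== VERDICT (by name: the statement is the Claim_ definition above) =====
theorem build_label_aliases_py_spec : Claim_equal_build_label_aliases_py := by
  intro rows known _
  show build_label_aliases_py rows known = build_label_aliases_py_alt rows known
  unfold build_label_aliases_py build_label_aliases_py_alt
  show _ = ((rows.filterMap (pvPairOfRow known)).foldl
      (fun res p => if res.contains p.1 then res
        else res.insert p.1 (pvV (rows.filterMap (pvPairOfRow known)) p.1))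
      PySem.Dict.empty).items
  rw [pv_foldA_rows, pv_main]
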